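-- pv_equiv track=rewrite | github.com/Ryumkin/algorithms_part1 | week4/not_angry.py | not_angry
-- ===== SOURCE A (Python) =====
-- def not_angry(n):
--     # tbl[i] is going to contain the number of possible combinations for i days
--     tbl = [0] * (n + 1)
--     if n > 0:
--         # base case: for just one day, there are ?? options
--         tbl[1] = 1
--         tbl[0] = 0
--         for i in range(2, n + 1):
--             tbl[i] = tbl[i-1] + tbl[i-2] + 1
--         return tbl[n] +1
-- ===== SOURCE B (Python) =====
-- def not_angry(n):
--     # fast-doubling Fibonacci: the table recurrence tbl[i] = tbl[i-1]+tbl[i-2]+1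
--     # with tbl[0]=0, tbl[1]=1 has closed form tbl[i] = fib(i+2) - 1,
--     # so the answer tbl[n] + 1 equals fib(n+2).
--     if n <= 0:
--         return None
--     return _fib_pair(n + 2)[0]
--
--
-- def _fib_pair(m):
--     # returns (fib(m), fib(m+1)) by fast doubling
--     if m == 0:
--         return (0, 1)
--     a, b = _fib_pair(m // 2)
--     c = a * (2 * b - a)
--     d = a * a + b * b
--     if m % 2 == 1:
--         return (d, c + d)
--     return (c, d)
-- ===== Notes on version B (the rewrite author's own statement) =====
-- stated objective: faster
-- what changed: Replaces the O(n) dynamic-programming table (tbl[i]=tbl[i-1]+tbl[i-2]+1) by the closed form tbl[n]+1 = fib(n+2) computed with fast-doubling Fibonacci in O(log n) multiplications.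
import Mathlib
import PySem

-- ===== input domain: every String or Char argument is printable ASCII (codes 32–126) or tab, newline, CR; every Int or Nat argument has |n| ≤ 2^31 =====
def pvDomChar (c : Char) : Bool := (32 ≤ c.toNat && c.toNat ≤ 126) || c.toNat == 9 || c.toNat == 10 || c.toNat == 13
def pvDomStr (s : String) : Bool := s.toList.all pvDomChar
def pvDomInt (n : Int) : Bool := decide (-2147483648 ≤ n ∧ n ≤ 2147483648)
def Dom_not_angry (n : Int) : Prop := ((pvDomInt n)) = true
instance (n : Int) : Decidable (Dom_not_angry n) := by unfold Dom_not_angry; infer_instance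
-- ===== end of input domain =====

-- B replaces A's O(n) DP table (tbl[i]=tbl[i-1]+tbl[i-2]+1, answer tbl[n]+1) by the
-- closed form fib(n+2) computed with O(log n) fast-doubling Fibonacci.


-- ===== PORT A =====
-- tbl = [0]*(n+1): for negative n Python gives [], matched by .toNat on the LENGTH
-- (not on an index). All indices i, i-1, i-2 in the loop are ≥ 0 and in range, so
-- .set / .getD on the natural index are exact here.
def not_angry (n : Int) : Option Int :=
  let tbl0 : List Int := List.replicate (n + 1).toNat 0
  if n > 0 then
    let tbl1 := (tbl0.set 1 1).set 0 0
    let tbl2 := (PySem.List.pyRange 2 (n + 1) 1).foldl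
      (fun t i => t.set i.toNat (t.getD (i.toNat - 1) 0 + t.getD (i.toNat - 2) 0 + 1)) tbl1
    some (tbl2.getD n.toNat 0 + 1)
  else
    none

-- ===== PORT B =====
-- _fib_pair(m) = (fib m, fib (m+1)) by fast doubling, as in Source B
def fibPair : Nat → Int × Int
  | 0 => (0, 1)
  | (m + 1) =>
    let p := fibPair ((m + 1) / 2)
    let a := p.1
    let b := p.2
    let c := a * (2 * b - a)
    let d := a * a + b * b
    if (m + 1) % 2 == 1 then (d, c + d) else (c, d)
  decreasing_by exact Nat.div_lt_self (Nat.succ_pos m) one_lt_two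

def not_angry_alt (n : Int) : Option Int :=
  if n ≤ 0 then none else some (fibPair (n + 2).toNat).1

-- ===== PRECONDITION & SPEC =====
def Spec_not_angry (n : Int) (out : Option Int) : Prop := out = not_angry_alt n
instance (n : Int) (out : Option Int) : Decidable (Spec_not_angry n out) := by unfold Spec_not_angry; infer_instance

-- ===== CLAIM =====
def Claim_equal_not_angry : Prop := ∀ (n : Int), Dom_not_angry n → Spec_not_angry n (not_angry n)

-- ===== LEMMAS AND PROOFS =====

-- fast doubling computes Fibonacci pairs
theorem fibPair_eq (m : Nat) : fibPair m = ((Nat.fib m : Int), (Nat.fib (m + 1) : Int)) := by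
  induction m using Nat.strong_induction_on with
  | _ m ih =>
    match m with
    | 0 => simp [fibPair]
    | (j + 1) =>
      rw [fibPair]
      have hlt : (j + 1) / 2 < j + 1 := Nat.div_lt_self (Nat.succ_pos j) one_lt_two
      rw [ih _ hlt]
      have hle : Nat.fib ((j + 1) / 2) ≤ 2 * Nat.fib ((j + 1) / 2 + 1) := by
        have := Nat.fib_le_fib_succ (n := (j + 1) / 2); omega
      set k := (j + 1) / 2 with hk
      have hfe : (Nat.fib (2 * k) : Int) =
          (Nat.fib k : Int) * (2 * (Nat.fib (k + 1) : Int) - (Nat.fib k : Int)) := by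
        rw [Nat.fib_two_mul]; push_cast [Nat.cast_sub hle]; ring
      have hfo : (Nat.fib (2 * k + 1) : Int) =
          (Nat.fib k : Int) * (Nat.fib k : Int) +
            (Nat.fib (k + 1) : Int) * (Nat.fib (k + 1) : Int) := by
        rw [Nat.fib_two_mul_add_one]; push_cast; ring
      rcases Nat.even_or_odd (j + 1) with he | ho
      · obtain ⟨t, ht⟩ := he
        have h2 : j + 1 = 2 * k := by omega
        have hmod : (j + 1) % 2 = 0 := by omega
        rw [if_neg (by simp [hmod])]
        simp only [Prod.mk.injEq]
        refine ⟨?_, ?_⟩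
        · rw [h2, hfe]
        · rw [show j + 1 + 1 = 2 * k + 1 by omega, hfo]
      · obtain ⟨t, ht⟩ := ho
        have h2 : j + 1 = 2 * k + 1 := by omega
        have hmod : (j + 1) % 2 = 1 := by omega
        have hsum : (Nat.fib (2 * k + 2) : Int) =
            (Nat.fib (2 * k) : Int) + (Nat.fib (2 * k + 1) : Int) := by
          rw [Nat.fib_add_two]; push_cast; ring
        rw [if_pos (by simp [hmod])]
        simp only [Prod.mk.injEq]
        refine ⟨?_, ?_⟩
        · rw [h2, hfo]
        · rw [show j + 1 + 1 = 2 * k + 2 by omega, hsum, hfe, hfo]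

-- the value A's table holds at index i
def Ftbl : Nat → Int
  | 0 => 0
  | 1 => 1
  | (k + 2) => Ftbl (k + 1) + Ftbl k + 1

theorem Ftbl_fib (k : Nat) : Ftbl k + 1 = (Nat.fib (k + 2) : Int) := by
  induction k using Nat.strong_induction_on with
  | _ k ih =>
    match k with
    | 0 => simp [Ftbl]
    | 1 => simp [Ftbl]; norm_num [Nat.fib]
    | (j + 2) =>
      have h1 : Ftbl (j + 1) + 1 = (Nat.fib (j + 3) : Int) := by
        rw [show j + 3 = j + 1 + 2 by ring]; exact ih (j + 1) (by omega)
      have h2 : Ftbl j + 1 = (Nat.fib (j + 2) : Int) := ih j (by omega)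
      have hf : (Nat.fib (j + 4) : Int) = (Nat.fib (j + 2) : Int) + (Nat.fib (j + 3) : Int) := by
        rw [show j + 4 = (j + 2) + 2 by ring, Nat.fib_add_two]; push_cast; ring
      show Ftbl (j + 2) + 1 = (Nat.fib (j + 2 + 2) : Int)
      rw [Ftbl, show j + 2 + 2 = j + 4 by ring, hf]
      omega

def pvInit (L : Nat) : List Int := ((List.replicate L (0 : Int)).set 1 1).set 0 0

def pvStep (t : List Int) (i : Int) : List Int :=
  t.set i.toNat (t.getD (i.toNat - 1) 0 + t.getD (i.toNat - 2) 0 + 1)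

theorem pvInv (L k : Nat) (hk : k + 2 ≤ L) :
    (((List.range k).map (fun j => (2 : Int) + (j : Nat))).foldl pvStep (pvInit L)).length = L ∧
    ∀ j, j < k + 2 →
      (((List.range k).map (fun j => (2 : Int) + (j : Nat))).foldl pvStep (pvInit L)).getD j 0
        = Ftbl j := by
  induction k with
  | zero =>
    have h0 : 0 < L := by omega
    have h1 : 1 < L := by omega
    refine ⟨by simp [pvInit], ?_⟩
    intro j hj
    interval_cases j <;> simp [pvInit, List.getD, h0, h1, Ftbl]
  | succ k ihk =>
    have hk' : k + 2 ≤ L := by omega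
    obtain ⟨hlen, hval⟩ := ihk hk'
    rw [List.range_succ, List.map_append, List.foldl_append]
    set t := ((List.range k).map (fun j => (2 : Int) + (j : Nat))).foldl pvStep (pvInit L) with ht
    simp only [List.map_cons, List.map_nil, List.foldl_cons, List.foldl_nil]
    have hidx : ((2 : Int) + (k : Nat)).toNat = k + 2 := by omega
    have hstep : pvStep t ((2 : Int) + (k : Nat)) = t.set (k + 2) (Ftbl (k + 2)) := by
      unfold pvStep
      rw [hidx]
      congr 1
      rw [show k + 2 - 1 = k + 1 by omega, show k + 2 - 2 = k by omega,
        hval (k + 1) (by omega), hval k (by omega)]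
      rfl
    rw [hstep]
    have hlt : k + 2 < L := by omega
    refine ⟨by simp [hlen], ?_⟩
    intro j hj
    by_cases hje : j = k + 2
    · subst hje
      simp [List.getD, hlen, hlt]
    · have hjlt : j < k + 2 := by omega
      have hne : ¬ (k + 2 = j) := by omega
      rw [List.getD, List.getElem?_set]
      simp only [hne, if_false]
      exact hval j hjlt

-- ===== VERDICT =====
theorem not_angry_spec : Claim_equal_not_angry := by
  unfold Claim_equal_not_angry
  intro n _
  unfold Spec_not_angry
  by_cases hn : n > 0
  · obtain ⟨m, rfl⟩ : ∃ m : Nat, n = (m : Int) := ⟨n.toNat, by omega⟩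
    have hm1 : 1 ≤ m := by exact_mod_cast hn
    have hrange : PySem.List.pyRange 2 ((m : Int) + 1) 1
        = (List.range (m - 1)).map (fun j => (2 : Int) + (j : Nat)) := by
      rw [PySem.List.pyRange_one, show (((m : Int) + 1) - 2).toNat = m - 1 by omega]
    have hL : ((m : Int) + 1).toNat = m + 1 := by omega
    have hinv := pvInv (m + 1) (m - 1) (by omega)
    have hN : ((m : Int)).toNat = m := by omega
    have hN2 : ((m : Int) + 2).toNat = m + 2 := by omega
    simp only [not_angry, not_angry_alt, if_pos hn, if_neg (show ¬ ((m : Int) ≤ 0) by omega),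
      hrange, hL, hN, hN2]
    rw [show (fun (t : List Int) (i : Int) =>
          t.set i.toNat (t.getD (i.toNat - 1) 0 + t.getD (i.toNat - 2) 0 + 1)) = pvStep from rfl,
      show (((List.replicate (m + 1) (0 : Int)).set 1 1).set 0 0) = pvInit (m + 1) from rfl]
    rw [hinv.2 m (by omega), fibPair_eq (m + 2)]
    simp [Ftbl_fib m]
  · simp only [not_angry, not_angry_alt, if_neg hn, if_pos (show n ≤ 0 by omega)]
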